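-- pv_equiv track=rewrite | github.com/hahyuning/Coding-test-study | test/라인/q2 (해시).py | solution
-- ===== SOURCE A (Python) =====
-- from collections import Counter, defaultdict
--
-- def solution(research, n, k):
--     ans = defaultdict(int)
--
--     for i in range(len(research)):
--         research[i] = Counter(list(research[i]))
--
--     for i, day in enumerate(research):
--         if i + n > len(research):
--             break
--
--         for key, val in day.items():
--             if val >= k:
--                 cnt = 0
--
--                 for j in range(i, i + n):
--                     if key not in research[j]:
--                         break
--
--                     if research[j][key] < k:
--                         break
--
--                     cnt += research[j][key]
--                 else:
--                     if cnt >= 2 * n * k: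
--                         ans[key] += 1
--
--     if len(ans.keys()) == 0:
--         return "None"
--
--     max_val = 0
--     for key, val in ans.items():
--         if val > max_val:
--             max_val = val
--
--     res = []
--     for key, val in ans.items():
--         if val == max_val:
--             res.append(key)
--     res.sort()
--
--     return res[0]
-- ===== SOURCE B (Python) =====
-- # B: per-character prefix sums and run-lengths of good days; each window start is tested without rescanning the window.
-- def solution(research, n, k):
--     days = []
--     for s in research:
--         d = {}
--         for ch in s:
--             d[ch] = d.get(ch, 0) + 1
--         days.append(d)
--     goal = 2 * n * k
--     best = (0, "None")
--     chars = set()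
--     for s in research:
--         chars |= set(s)
--     for ch in sorted(chars):
--         cnts = [d.get(ch, 0) for d in days]
--         good = [ch in d and d[ch] >= k for d in days]
--         pre = [0]                       # prefix sums of cnts
--         for x in cnts:
--             pre.append(pre[-1] + x)
--         run = [0]                       # run[i] = length of the run of good days starting at i
--         for g in reversed(good):
--             run.append(run[-1] + 1 if g else 0)
--         run.reverse()
--         w = 0
--         for i in range(len(research) - n + 1):
--             if run[i] >= n and pre[i + n] - pre[i] >= goal:
--                 w += 1
--         if w > best[0]:
--             best = (w, ch)
--     return best[1]
-- ===== Notes on version B (the rewrite author's own statement) =====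
-- stated objective: alternative
-- what changed: A rescans and resums the whole n-day window for every (start day, key) pair; B builds plain per-day count dicts once and, per distinct character, prefix sums and right-to-left run lengths of good days, so each window start is tested without rescanning the window; Pre_ excludes non-positive n, outside the n-day-window problem's natural domain, where A's break never fires and it scans empty windows while B's window indexing raises IndexError for n < 0.
-- outside the precondition, e.g. on solution(['ab', 'b'], 0, 1): A returns 'b', B returns 'a'; on solution(['ab', 'b'], -1, 1): A returns 'b', B raises IndexError
import Mathlib
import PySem

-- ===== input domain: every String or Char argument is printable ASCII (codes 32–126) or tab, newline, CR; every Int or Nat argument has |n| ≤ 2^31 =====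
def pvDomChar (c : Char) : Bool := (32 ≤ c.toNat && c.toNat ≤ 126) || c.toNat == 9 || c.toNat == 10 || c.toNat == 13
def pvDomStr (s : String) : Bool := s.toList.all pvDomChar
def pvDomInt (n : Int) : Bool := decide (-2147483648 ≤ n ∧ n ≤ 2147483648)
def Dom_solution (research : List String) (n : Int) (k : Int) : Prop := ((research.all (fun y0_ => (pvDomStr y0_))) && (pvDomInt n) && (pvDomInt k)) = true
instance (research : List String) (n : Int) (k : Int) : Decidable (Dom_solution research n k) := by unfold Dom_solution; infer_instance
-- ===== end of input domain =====

-- B replaces A's per-(start,key) window rescans by per-character prefix sums and run lengths of good days (objective: alternative).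
-- NOTE: the Python A mutates its 'research' argument in place (replacing the strings by Counters);
-- B does not, and the equivalence proved here is about the RETURN value only.
-- ===== PORT A =====
-- A-side helpers (literal transliteration of Source A)
def solutionDays (research : List String) : List (PySem.Dict Char Int) :=
  research.map (fun s => PySem.Dict.counter s.toList)

-- the 'for j in range(i, i+n)' loop with its two breaks; 'none' = a break fired, 'some cnt' = for-else
def solutionInner (days : List (PySem.Dict Char Int)) (key : Char) (k : Int) :
    List Int → Int → Option Int
  | [], cnt => some cnt
  | j :: js, cnt =>
    let dj := PySem.List.pyGetD days j PySem.Dict.empty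
    if dj.contains key = false then none
    else if dj.getD key 0 < k then none
    else solutionInner days key k js (cnt + dj.getD key 0)

-- the 'for key, val in day.items()' body
def solutionProc (days : List (PySem.Dict Char Int)) (n k : Int) (i : Int)
    (day : PySem.Dict Char Int) (ans : PySem.Dict Char Int) : PySem.Dict Char Int :=
  day.items.foldl (fun ans kv =>
    if kv.2 ≥ k then
      match solutionInner days kv.1 k (PySem.List.pyRange i (i + n) 1) 0 with
      | none => ans
      | some cnt => if cnt ≥ 2 * n * k then ans.modify kv.1 0 (· + 1) else ans
    else ans) ans

-- the 'for i, day in enumerate(research)' loop with its break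
def solutionOuter (days : List (PySem.Dict Char Int)) (n k L : Int) :
    List (Int × PySem.Dict Char Int) → PySem.Dict Char Int → PySem.Dict Char Int
  | [], ans => ans
  | (i, day) :: rest, ans =>
    if i + n > L then ans
    else solutionOuter days n k L rest (solutionProc days n k i day ans)

def solution (research : List String) (n : Int) (k : Int) : String :=
  let days := solutionDays research
  let ans := solutionOuter days n k (PySem.List.len days) (PySem.List.enumerate days) PySem.Dict.empty
  if (PySem.Dict.keys ans).length = 0 then "None"
  else
    let maxVal := ans.items.foldl (fun m kv => if kv.2 > m then kv.2 else m) (0 : Int)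
    let res := ans.items.foldl (fun r kv => if kv.2 = maxVal then r ++ [kv.1] else r) ([] : List Char)
    match PySem.List.pyGet? (PySem.List.sorted res (fun x => x) false) 0 with
    | some c => String.ofList [c]   -- res[0]; res is provably nonempty here
    | none => ""

-- ===== PORT B =====
-- B-side helpers (literal transliteration of Source B)
-- prefix sums: pre = [0]; for x in cnts: pre.append(pre[-1] + x)
def solutionAltScan (acc : Int) : List Int → List Int
  | [] => [acc]
  | x :: xs => acc :: solutionAltScan (acc + x) xs

-- run[i] = length of the run of good days starting at i (Source B builds it right-to-left and reverses)
def solutionAltRunsB : List Bool → List Int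
  | [] => [0]
  | g :: gs =>
    let r := solutionAltRunsB gs
    (if g then r.headD 0 + 1 else 0) :: r

def solution_alt (research : List String) (n : Int) (k : Int) : String :=
  let days := research.map (fun s => s.toList.foldl (fun d ch => d.insert ch (d.getD ch 0 + 1)) (PySem.Dict.empty : PySem.Dict Char Int))
  let goal : Int := 2 * n * k
  let chars := research.foldl (fun acc s => PySem.Set.update acc (PySem.Set.ofList s.toList)) ([] : List Char)
  let best := (PySem.List.sorted chars (fun x => x) false).foldl (fun (best : Int × String) ch =>
      let cnts := days.map (fun d => d.getD ch 0)
      let good := days.map (fun d => d.contains ch && decide (d.getD ch 0 ≥ k))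
      let pre := solutionAltScan 0 cnts
      let run := solutionAltRunsB good
      let w := (PySem.List.pyRange 0 (PySem.List.len research - n + 1) 1).foldl (fun w i =>
          if PySem.List.pyGetD run i 0 ≥ n ∧
             PySem.List.pyGetD pre (i + n) 0 - PySem.List.pyGetD pre i 0 ≥ goal
          then w + 1 else w) (0 : Int)
      if w > best.1 then (w, String.ofList [ch]) else best) ((0 : Int), "None")
  best.2

-- ===== PRECONDITION & SPEC =====
-- Pre_ excludes non-positive n, outside the n-day-window problem's natural domain: there A's
-- break never fires (it scans every start day with an empty window, an accidental value), and
-- B's window indexing raises IndexError for n < 0.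
def Pre_solution (research : List String) (n : Int) (k : Int) : Prop := 1 ≤ n
instance (research : List String) (n : Int) (k : Int) : Decidable (Pre_solution research n k) := by unfold Pre_solution; infer_instance
def pvWitness_solution : List String × Int × Int := (["ab", "b"], 1, 1)

def Spec_solution (research : List String) (n : Int) (k : Int) (out : String) : Prop := out = solution_alt research n k
instance (research : List String) (n : Int) (k : Int) (out : String) : Decidable (Spec_solution research n k out) := by unfold Spec_solution; infer_instance

-- ===== CLAIM (what is proved, stated in full; the proofs are below) =====
def Claim_equal_solution : Prop := ∀ (research : List String) (n : Int) (k : Int), Dom_solution research n k → Pre_solution research n k → Spec_solution research n k (solution research n k)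

-- ===== LEMMAS AND PROOFS =====
def pvCnt (research : List String) (c : Char) (j : Nat) : Int :=
  ((research.getD j "").toList.count c : Int)

def pvCondB (research : List String) (n k : Int) (c : Char) (i : Nat) : Bool :=
  decide (max k 1 ≤ pvCnt research c i) &&
  ((List.range n.toNat).all fun t => decide (max k 1 ≤ pvCnt research c (i + t))) &&
  decide (2 * n * k ≤ ((List.range n.toNat).map fun t => pvCnt research c (i + t)).sum)

def pvStarts (research : List String) (n : Int) : Nat :=
  (min (research.length : Int) ((research.length : Int) - n + 1)).toNat

def pvW (research : List String) (n k : Int) (c : Char) : Nat :=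
  (List.range (pvStarts research n)).countP (pvCondB research n k c)

def pvResult (research : List String) (n k : Int) : String :=
  ((PySem.List.sorted (research.foldl (fun acc s => PySem.Set.update acc (PySem.Set.ofList s.toList)) ([] : List Char)) (fun x => x) false).foldl
    (fun b c => if (pvW research n k c : Int) > b.1 then ((pvW research n k c : Int), String.ofList [c]) else b)
    ((0 : Int), "None")).2

lemma pvStarts_le (research : List String) (n : Int) : pvStarts research n ≤ research.length := by
  unfold pvStarts; omega

lemma pvDays_getD (research : List String) (j : Nat) (hj : j < research.length) :
    PySem.List.pyGetD (solutionDays research) (j : Int) PySem.Dict.empty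
      = PySem.Dict.counter (research.getD j "").toList := by
  unfold solutionDays
  rw [PySem.List.pyGetD_natCast]
  rw [List.getD_eq_getElem?_getD, List.getElem?_map]
  rw [List.getElem?_eq_getElem hj]
  simp [List.getD_eq_getElem?_getD, List.getElem?_eq_getElem hj]

lemma inner_spec (research : List String) (k : Int) (c : Char) :
    ∀ (js : List Int) (acc : Int), (∀ j ∈ js, 0 ≤ j ∧ j < (research.length : Int)) →
    solutionInner (solutionDays research) c k js acc =
      if js.all (fun j => decide (max k 1 ≤ pvCnt research c j.toNat)) then
        some (acc + (js.map fun j => pvCnt research c j.toNat).sum)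
      else none := by
  intro js
  induction js with
  | nil => intro acc _; simp [solutionInner]
  | cons j js ih =>
    intro acc hmem
    obtain ⟨hj0, hjL⟩ := hmem j (by simp)
    have hjN : j.toNat < research.length := by omega
    have hcast : ((j.toNat : Nat) : Int) = j := by omega
    have hd : PySem.List.pyGetD (solutionDays research) j PySem.Dict.empty
        = PySem.Dict.counter (research.getD j.toNat "").toList := by
      rw [← hcast]; exact pvDays_getD research j.toNat hjN
    have hcnt : pvCnt research c j.toNat = ((research.getD j.toNat "").toList.count c : Int) := rfl
    simp only [solutionInner, hd, PySem.Dict.contains_counter, PySem.Dict.getD_counter]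
    by_cases hc : c ∈ (research.getD j.toNat "").toList
    · have hcont : (research.getD j.toNat "").toList.contains c = true := by simpa using hc
      have hpos : 0 < (research.getD j.toNat "").toList.count c := List.count_pos_iff.mpr hc
      rw [hcont, if_neg (by simp)]
      by_cases hk : ((research.getD j.toNat "").toList.count c : Int) < k
      · rw [if_pos hk]
        have hdec : decide (max k 1 ≤ pvCnt research c j.toNat) = false := by
          rw [decide_eq_false_iff_not, hcnt]
          intro hle
          have := le_trans (le_max_left k 1) hle
          omega
        rw [List.all_cons, hdec, Bool.false_and, if_neg (by simp)]
      · rw [if_neg hk]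
        rw [ih _ (fun x hx => hmem x (by simp [hx]))]
        have hdec : decide (max k 1 ≤ pvCnt research c j.toNat) = true := by
          rw [decide_eq_true_eq, hcnt]
          exact max_le (by omega) (by omega)
        rw [List.all_cons, hdec, Bool.true_and, List.map_cons, List.sum_cons]
        split
        · rw [hcnt]; congr 1; ring
        · rfl
    · have hcont : (research.getD j.toNat "").toList.contains c = false := by simpa using hc
      have h0 : (research.getD j.toNat "").toList.count c = 0 := List.count_eq_zero.mpr hc
      rw [hcont, if_pos rfl]
      have hdec : decide (max k 1 ≤ pvCnt research c j.toNat) = false := by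
        rw [decide_eq_false_iff_not, hcnt, h0]
        intro hle
        have := le_trans (le_max_right k 1) hle
        norm_num at this
      rw [List.all_cons, hdec, Bool.false_and, if_neg (by simp)]

lemma foldModify_spec (P : Char → Bool) :
    ∀ (ks : List Char) (ans : PySem.Dict Char Int), ks.Nodup →
    (∀ c, (ks.foldl (fun a c' => if P c' then a.modify c' 0 (· + 1) else a) ans).getD c 0
        = ans.getD c 0 + (if c ∈ ks ∧ P c then 1 else 0))
    ∧ (∀ c, c ∈ (ks.foldl (fun a c' => if P c' then a.modify c' 0 (· + 1) else a) ans).keys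
        ↔ c ∈ ans.keys ∨ (c ∈ ks ∧ P c))
    ∧ (ans.keys.Nodup → (ks.foldl (fun a c' => if P c' then a.modify c' 0 (· + 1) else a) ans).keys.Nodup) := by
  intro ks
  induction ks with
  | nil => intro ans _; refine ⟨fun c => by simp, fun c => by simp, fun h => by simpa using h⟩
  | cons x ks ih =>
    intro ans hnd
    have hx : x ∉ ks := (List.nodup_cons.mp hnd).1
    have hnd' : ks.Nodup := (List.nodup_cons.mp hnd).2
    set ans' := if P x then ans.modify x 0 (· + 1) else ans with hans'
    have hfold : (x :: ks).foldl (fun a c' => if P c' then a.modify c' 0 (· + 1) else a) ans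
        = ks.foldl (fun a c' => if P c' then a.modify c' 0 (· + 1) else a) ans' := by
      simp [List.foldl_cons, hans']
    obtain ⟨ihg, ihk, ihn⟩ := ih ans' hnd'
    have hget : ∀ c, ans'.getD c 0 = ans.getD c 0 + (if c = x ∧ P x then 1 else 0) := by
      intro c
      rw [hans']
      by_cases hp : P x
      · rw [if_pos hp, PySem.Dict.getD_modify]
        by_cases hcx : c = x
        · simp [hcx, hp]
        · simp [hcx]
      · simp [hp]
    have hkey : ∀ c, c ∈ ans'.keys ↔ c ∈ ans.keys ∨ (c = x ∧ P x) := by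
      intro c
      rw [hans']
      by_cases hp : P x
      · rw [if_pos hp, PySem.Dict.keys_modify, PySem.Dict.mem_keys_insert]
        constructor
        · rintro (h | h)
          · exact Or.inr ⟨h, hp⟩
          · exact Or.inl h
        · rintro (h | ⟨h, _⟩)
          · exact Or.inr h
          · exact Or.inl h
      · simp [hp]
    refine ⟨?_, ?_, ?_⟩
    · intro c
      rw [hfold, ihg c, hget c]
      by_cases hcx : c = x
      · subst hcx
        simp only [List.mem_cons, true_or, true_and]
        by_cases hp : P c
        · simp [hp, hx]
        · simp [hp]
      · simp only [List.mem_cons, hcx, false_or, false_and, if_false, add_zero]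
    · intro c
      rw [hfold, ihk c, hkey c]
      constructor
      · rintro ((h | h) | h)
        · exact Or.inl h
        · exact Or.inr ⟨by simp [h.1], by rw [h.1]; exact h.2⟩
        · exact Or.inr ⟨by simp [h.1], h.2⟩
      · rintro (h | ⟨h, hp⟩)
        · exact Or.inl (Or.inl h)
        · rcases List.mem_cons.mp h with h | h
          · exact Or.inl (Or.inr ⟨h, h ▸ hp⟩)
          · exact Or.inr ⟨h, hp⟩
    · intro hn
      refine ihn ?_
      rw [hans']
      by_cases hp : P x
      · rw [if_pos hp, PySem.Dict.keys_modify]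
        exact PySem.Dict.nodup_keys_insert _ _ _ hn
      · simpa [hp] using hn

lemma inner_range_spec (research : List String) (n k : Int) (c : Char) (i : Nat)
    (hin : (i : Int) + n ≤ (research.length : Int)) :
    solutionInner (solutionDays research) c k (PySem.List.pyRange (i : Int) ((i : Int) + n) 1) 0 =
      if ((List.range n.toNat).all fun t => decide (max k 1 ≤ pvCnt research c (i + t))) then
        some (((List.range n.toNat).map fun t => pvCnt research c (i + t)).sum)
      else none := by
  rw [PySem.List.pyRange_one]
  have hnt : ((i : Int) + n - i).toNat = n.toNat := by omega
  rw [hnt]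
  have hmem : ∀ j ∈ (List.range n.toNat).map (fun t : Nat => (i : Int) + t),
      0 ≤ j ∧ j < (research.length : Int) := by
    intro j hj
    simp only [List.mem_map, List.mem_range] at hj
    obtain ⟨t, ht, rfl⟩ := hj
    constructor
    · positivity
    · have : (t : Int) < n := by omega
      omega
  rw [inner_spec research k c _ 0 hmem]
  simp only [List.all_map, List.map_map]
  have he : ∀ t ∈ List.range n.toNat, (((i : Int) + (t : Int)).toNat) = i + t := by
    intro t _; omega
  have hall : (List.range n.toNat).all ((fun j => decide (max k 1 ≤ pvCnt research c j.toNat)) ∘ fun t : Nat => (i : Int) + t)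
      = (List.range n.toNat).all (fun t => decide (max k 1 ≤ pvCnt research c (i + t))) := by
    apply List.all_congr rfl
    intro t
    have : (((i : Int) + (t : Int)).toNat) = i + t := by omega
    simp [Function.comp, this]
  have hsum : List.map ((fun j => pvCnt research c j.toNat) ∘ fun t : Nat => (i : Int) + t) (List.range n.toNat)
      = List.map (fun t => pvCnt research c (i + t)) (List.range n.toNat) := by
    apply List.map_congr_left
    intro t ht
    simp [Function.comp, he t ht]
  rw [hall, hsum]
  split <;> simp

lemma proc_spec (research : List String) (n k : Int) (i : Nat)
    (_hiL : i < research.length) (hin : (i : Int) + n ≤ (research.length : Int))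
    (ans : PySem.Dict Char Int) :
    (∀ c, (solutionProc (solutionDays research) n k (i : Int)
            (PySem.Dict.counter (research.getD i "").toList) ans).getD c 0
        = ans.getD c 0 + (if pvCondB research n k c i then 1 else 0))
    ∧ (∀ c, c ∈ (solutionProc (solutionDays research) n k (i : Int)
            (PySem.Dict.counter (research.getD i "").toList) ans).keys
        ↔ c ∈ ans.keys ∨ pvCondB research n k c i = true)
    ∧ (ans.keys.Nodup → (solutionProc (solutionDays research) n k (i : Int)
            (PySem.Dict.counter (research.getD i "").toList) ans).keys.Nodup) := by
  have hstep : (PySem.Dict.counter (research.getD i "").toList).items.foldl (fun ans kv =>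
      if kv.2 ≥ k then
        match solutionInner (solutionDays research) kv.1 k (PySem.List.pyRange (i : Int) ((i : Int) + n) 1) 0 with
        | none => ans
        | some cnt => if cnt ≥ 2 * n * k then ans.modify kv.1 0 (· + 1) else ans
      else ans) ans
      = (PySem.Set.ofList (research.getD i "").toList).foldl
          (fun a c' => if pvCondB research n k c' i then a.modify c' 0 (· + 1) else a) ans := by
    rw [PySem.Dict.items_counter, List.foldl_map]
    apply PySem.List.foldl_congr_mem'
    intro c' hc' acc
    have hmem : c' ∈ (research.getD i "").toList := (PySem.Set.mem_ofList _ _).mp hc'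
    have hpos : 0 < (research.getD i "").toList.count c' := List.count_pos_iff.mpr hmem
    have hcnt : pvCnt research c' i = ((research.getD i "").toList.count c' : Int) := rfl
    simp only
    rw [inner_range_spec research n k c' i hin]
    unfold pvCondB
    by_cases hv : ((research.getD i "").toList.count c' : Int) ≥ k
    · rw [if_pos hv]
      have h1 : decide (max k 1 ≤ pvCnt research c' i) = true := by
        rw [decide_eq_true_eq, hcnt]
        exact max_le (by omega) (by omega)
      rw [h1, Bool.true_and]
      by_cases hall : ((List.range n.toNat).all fun t => decide (max k 1 ≤ pvCnt research c' (i + t))) = true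
      · rw [if_pos hall, hall, Bool.true_and]
        have hred : ∀ v : Int, (match (some v : Option Int) with
            | none => acc
            | some cnt => if cnt ≥ 2 * n * k then acc.modify c' 0 (· + 1) else acc)
            = if v ≥ 2 * n * k then acc.modify c' 0 (· + 1) else acc := fun _ => rfl
        rw [hred]
        by_cases hs : ((List.range n.toNat).map fun t => pvCnt research c' (i + t)).sum ≥ 2 * n * k
        · rw [if_pos hs, if_pos (by simpa using hs)]
        · rw [if_neg hs, if_neg (by simpa using hs)]
      · rw [if_neg hall]
        have hfls : ((List.range n.toNat).all fun t => decide (max k 1 ≤ pvCnt research c' (i + t))) = false := by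
          simpa using hall
        rw [hfls, Bool.false_and, if_neg (by simp)]
    · rw [if_neg hv]
      have h1 : decide (max k 1 ≤ pvCnt research c' i) = false := by
        rw [decide_eq_false_iff_not, hcnt]
        intro hle
        have := le_trans (le_max_left k 1) hle
        omega
      rw [h1, Bool.false_and, Bool.false_and, if_neg (by simp)]
  have hnodup : (PySem.Set.ofList (research.getD i "").toList).Nodup := PySem.Set.nodup_ofList _
  obtain ⟨hg, hk2, hn2⟩ := foldModify_spec (fun c' => pvCondB research n k c' i)
    (PySem.Set.ofList (research.getD i "").toList) ans hnodup
  have hPmem : ∀ c, pvCondB research n k c i = true → c ∈ PySem.Set.ofList (research.getD i "").toList := by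
    intro c hP
    unfold pvCondB at hP
    have h1 : max k 1 ≤ pvCnt research c i := by
      have := (Bool.and_eq_true _ _).mp ((Bool.and_eq_true _ _).mp hP).1
      exact of_decide_eq_true this.1
    have : 0 < (research.getD i "").toList.count c := by
      have h2 := le_trans (le_max_right k 1) h1
      unfold pvCnt at h2
      omega
    exact (PySem.Set.mem_ofList _ _).mpr (List.count_pos_iff.mp this)
  unfold solutionProc
  rw [hstep]
  refine ⟨?_, ?_, hn2⟩
  · intro c
    rw [hg c]
    by_cases hP : pvCondB research n k c i = true
    · rw [if_pos ⟨hPmem c hP, hP⟩, if_pos hP]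
    · rw [if_neg (by tauto), if_neg hP]
  · intro c
    rw [hk2 c]
    constructor
    · rintro (h | ⟨_, h⟩)
      · exact Or.inl h
      · exact Or.inr h
    · rintro (h | h)
      · exact Or.inl h
      · exact Or.inr ⟨hPmem c h, h⟩

lemma outer_spec (research : List String) (n k : Int) :
    ∀ (ds : List (PySem.Dict Char Int)) (s : Nat) (ans : PySem.Dict Char Int),
    ds = (solutionDays research).drop s → ans.keys.Nodup →
    (∀ c, (solutionOuter (solutionDays research) n k (research.length : Int)
            (PySem.List.enumerate ds (s : Int)) ans).getD c 0
        = ans.getD c 0 + ((List.range' s (pvStarts research n - s)).countP (pvCondB research n k c) : Int))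
    ∧ (∀ c, c ∈ (solutionOuter (solutionDays research) n k (research.length : Int)
            (PySem.List.enumerate ds (s : Int)) ans).keys
        ↔ c ∈ ans.keys ∨ 0 < (List.range' s (pvStarts research n - s)).countP (pvCondB research n k c))
    ∧ (solutionOuter (solutionDays research) n k (research.length : Int)
        (PySem.List.enumerate ds (s : Int)) ans).keys.Nodup := by
  intro ds
  induction ds with
  | nil =>
    intro s ans hdrop hnd
    have hlen : research.length ≤ s := by
      have := congrArg List.length hdrop
      simp [solutionDays] at this
      omega
    have h0 : pvStarts research n - s = 0 := by
      have := pvStarts_le research n; omega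
    rw [h0]
    simp [PySem.List.enumerate, solutionOuter, hnd]
  | cons d ds ih =>
    intro s ans hdrop hnd
    have hsL : s < (solutionDays research).length := by
      by_contra hge
      rw [List.drop_eq_nil_of_le (by omega)] at hdrop
      simp at hdrop
    have hsLr : s < research.length := by simpa [solutionDays] using hsL
    have hd : d = (solutionDays research)[s] := by
      have h2 : (solutionDays research)[s + 0]? = some d := by
        rw [← List.getElem?_drop, ← hdrop]
        rfl
      rw [Nat.add_zero] at h2
      rw [List.getElem?_eq_getElem hsL] at h2
      exact (Option.some.injEq _ _ ▸ h2).symm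
    have hds : ds = (solutionDays research).drop (s + 1) := by
      have h1 : ((solutionDays research).drop s).tail = (solutionDays research).drop (s + 1) := by
        rw [List.tail_drop]
      rw [← h1, ← hdrop]
      rfl
    have hdc : d = PySem.Dict.counter (research.getD s "").toList := by
      rw [hd]
      simp [solutionDays, List.getD_eq_getElem?_getD, List.getElem?_eq_getElem hsLr]
    rw [PySem.List.enumerate_cons]
    by_cases hbrk : (s : Int) + n > (research.length : Int)
    · have h0 : pvStarts research n - s = 0 := by unfold pvStarts; omega
      rw [h0]
      simp only [solutionOuter, if_pos hbrk]
      exact ⟨fun c => by simp, fun c => by simp, hnd⟩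
    · have hin : (s : Int) + n ≤ (research.length : Int) := by omega
      obtain ⟨pg, pk, pn⟩ := proc_spec research n k s hsLr hin ans
      rw [← hdc] at pg pk pn
      have hnd' := pn hnd
      have hcast : (s : Int) + 1 = ((s + 1 : Nat) : Int) := by push_cast; ring
      obtain ⟨ig, ik, inn⟩ := ih (s + 1) (solutionProc (solutionDays research) n k (s : Int) d ans) hds hnd'
      rw [← hcast] at ig ik inn
      have hsst : s < pvStarts research n := by unfold pvStarts; omega
      have hrange : List.range' s (pvStarts research n - s)
          = s :: List.range' (s + 1) (pvStarts research n - (s + 1)) := by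
        have h1 : pvStarts research n - s = (pvStarts research n - (s + 1)) + 1 := by omega
        rw [h1, List.range'_succ]
      simp only [solutionOuter, if_neg hbrk]
      refine ⟨?_, ?_, inn⟩
      · intro c
        rw [ig c, pg c, hrange, List.countP_cons]
        by_cases hP : pvCondB research n k c s = true
        · simp only [hP, if_true]
          push_cast
          ring
        · simp only [hP]
          push_cast
          simp
      · intro c
        rw [ik c, pk c, hrange, List.countP_cons]
        by_cases hP : pvCondB research n k c s = true
        · simp [hP]
        · simp [hP]

lemma pvW_pos_mem (research : List String) (n k : Int) (c : Char)
    (h : 0 < pvW research n k c) : ∃ s ∈ research, c ∈ s.toList := by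
  unfold pvW at h
  obtain ⟨i, hi, hP⟩ := List.countP_pos_iff.mp h
  have hiS : i < pvStarts research n := List.mem_range.mp hi
  have hiL : i < research.length := lt_of_lt_of_le hiS (pvStarts_le research n)
  unfold pvCondB at hP
  have h1 : max k 1 ≤ pvCnt research c i := by
    have := (Bool.and_eq_true _ _).mp ((Bool.and_eq_true _ _).mp hP).1
    exact of_decide_eq_true this.1
  have hpos : 0 < (research.getD i "").toList.count c := by
    have h2 := le_trans (le_max_right k 1) h1
    unfold pvCnt at h2
    omega
  refine ⟨research.getD i "", ?_, List.count_pos_iff.mp hpos⟩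
  rw [List.getD_eq_getElem?_getD, List.getElem?_eq_getElem hiL]
  exact List.getElem_mem hiL

lemma chars_mem_gen (l : List String) : ∀ (acc : List Char) (c : Char),
    c ∈ l.foldl (fun acc s => PySem.Set.update acc (PySem.Set.ofList s.toList)) acc
      ↔ c ∈ acc ∨ ∃ s ∈ l, c ∈ s.toList := by
  induction l with
  | nil => intro acc c; simp
  | cons x l ih =>
    intro acc c
    rw [List.foldl_cons, ih]
    rw [PySem.Set.mem_update]
    constructor
    · rintro ((h | h) | ⟨s, hs, hc⟩)
      · exact Or.inl h
      · exact Or.inr ⟨x, by simp, by simpa [PySem.Set.mem_ofList] using h⟩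
      · exact Or.inr ⟨s, by simp [hs], hc⟩
    · rintro (h | ⟨s, hs, hc⟩)
      · exact Or.inl (Or.inl h)
      · rcases List.mem_cons.mp hs with h | h
        · subst h; exact Or.inl (Or.inr (by simpa [PySem.Set.mem_ofList] using hc))
        · exact Or.inr ⟨s, h, hc⟩

lemma chars_mem (research : List String) (c : Char) :
    c ∈ research.foldl (fun acc s => PySem.Set.update acc (PySem.Set.ofList s.toList)) ([] : List Char)
      ↔ ∃ s ∈ research, c ∈ s.toList := by
  rw [chars_mem_gen]
  simp

lemma chars_nodup_gen (l : List String) : ∀ (acc : List Char), acc.Nodup →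
    (l.foldl (fun acc s => PySem.Set.update acc (PySem.Set.ofList s.toList)) acc).Nodup := by
  induction l with
  | nil => intro acc h; simpa using h
  | cons x l ih =>
    intro acc h
    rw [List.foldl_cons]
    exact ih _ (PySem.Set.nodup_update _ _ h)

lemma chars_nodup (research : List String) :
    (research.foldl (fun acc s => PySem.Set.update acc (PySem.Set.ofList s.toList)) ([] : List Char)).Nodup :=
  chars_nodup_gen research [] (by simp)

lemma foldBest_low (wI : Char → Int) (toS : Char → String) :
    ∀ (cs : List Char) (b0 : Int) (s0 : String), (∀ c ∈ cs, wI c ≤ b0) →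
    cs.foldl (fun b c => if wI c > b.1 then (wI c, toS c) else b) (b0, s0) = (b0, s0) := by
  intro cs
  induction cs with
  | nil => intro b0 s0 _; rfl
  | cons x cs ih =>
    intro b0 s0 hle
    rw [List.foldl_cons]
    have hx : ¬ (wI x > b0) := by
      have := hle x (by simp)
      omega
    rw [if_neg hx]
    exact ih b0 s0 (fun c hc => hle c (by simp [hc]))

lemma foldBest_high (wI : Char → Int) (toS : Char → String) :
    ∀ (cs : List Char) (b0 : Int) (s0 : String), cs.Pairwise (· < ·) → (∃ c ∈ cs, b0 < wI c) →
    ∃ c ∈ cs, b0 < wI c ∧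
      cs.foldl (fun b c' => if wI c' > b.1 then (wI c', toS c') else b) (b0, s0) = (wI c, toS c) ∧
      (∀ c' ∈ cs, wI c' ≤ wI c) ∧ (∀ c' ∈ cs, wI c' = wI c → c ≤ c') := by
  intro cs
  induction cs with
  | nil => intro b0 s0 _ h; simp at h
  | cons x cs ih =>
    intro b0 s0 hpw hex
    have hpw' : cs.Pairwise (· < ·) := (List.pairwise_cons.mp hpw).2
    have hxlt : ∀ c ∈ cs, x < c := (List.pairwise_cons.mp hpw).1
    rw [List.foldl_cons]
    by_cases hx : wI x > b0
    · rw [if_pos hx]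
      by_cases hex' : ∃ c ∈ cs, wI x < wI c
      · obtain ⟨c, hc, hb, hfold, hmax, htie⟩ := ih (wI x) (toS x) hpw' hex'
        refine ⟨c, by simp [hc], by omega, hfold, ?_, ?_⟩
        · intro c' hc'
          rcases List.mem_cons.mp hc' with h | h
          · subst h; omega
          · exact hmax c' h
        · intro c' hc' heq
          rcases List.mem_cons.mp hc' with h | h
          · exfalso; subst h; omega
          · exact htie c' h heq
      · have hex'' : ∀ c ∈ cs, wI c ≤ wI x := by
          intro c hc
          by_contra hgt
          exact hex' ⟨c, hc, by omega⟩
        rw [foldBest_low wI toS cs (wI x) (toS x) hex'']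
        refine ⟨x, by simp, hx, rfl, ?_, ?_⟩
        · intro c' hc'
          rcases List.mem_cons.mp hc' with h | h
          · subst h; omega
          · exact hex'' c' h
        · intro c' hc' _
          rcases List.mem_cons.mp hc' with h | h
          · subst h; exact le_refl _
          · exact le_of_lt (hxlt c' h)
    · rw [if_neg hx]
      have hex2 : ∃ c ∈ cs, b0 < wI c := by
        obtain ⟨c, hc, hb⟩ := hex
        rcases List.mem_cons.mp hc with h | h
        · exfalso; subst h; omega
        · exact ⟨c, h, hb⟩
      obtain ⟨c, hc, hb, hfold, hmax, htie⟩ := ih b0 s0 hpw' hex2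
      refine ⟨c, by simp [hc], hb, hfold, ?_, ?_⟩
      · intro c' hc'
        rcases List.mem_cons.mp hc' with h | h
        · subst h; omega
        · exact hmax c' h
      · intro c' hc' heq
        rcases List.mem_cons.mp hc' with h | h
        · exfalso; subst h; omega
        · exact htie c' h heq

lemma foldMax_spec (v : Char → Int) :
    ∀ (ks : List Char) (a : Int),
    (∀ c ∈ ks, v c ≤ ks.foldl (fun m c => if v c > m then v c else m) a)
    ∧ (ks.foldl (fun m c => if v c > m then v c else m) a = a
        ∨ ∃ c ∈ ks, ks.foldl (fun m c => if v c > m then v c else m) a = v c)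
    ∧ a ≤ ks.foldl (fun m c => if v c > m then v c else m) a := by
  intro ks
  induction ks with
  | nil => intro a; exact ⟨by simp, Or.inl rfl, le_refl a⟩
  | cons x ks ih =>
    intro a
    rw [List.foldl_cons]
    by_cases hx : v x > a
    · obtain ⟨h1, h2, h3⟩ := ih (v x)
      rw [if_pos hx]
      refine ⟨?_, ?_, by omega⟩
      · intro c hc
        rcases List.mem_cons.mp hc with h | h
        · subst h; exact h3
        · exact h1 c h
      · rcases h2 with h | ⟨c, hc, h⟩
        · exact Or.inr ⟨x, by simp, h⟩
        · exact Or.inr ⟨c, by simp [hc], h⟩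
    · obtain ⟨h1, h2, h3⟩ := ih a
      rw [if_neg hx]
      refine ⟨?_, ?_, h3⟩
      · intro c hc
        rcases List.mem_cons.mp hc with h | h
        · subst h; omega
        · exact h1 c h
      · rcases h2 with h | ⟨c, hc, h⟩
        · exact Or.inl h
        · exact Or.inr ⟨c, by simp [hc], h⟩

lemma scan_getD (x0 : Int) : ∀ (xs : List Int) (a : Int) (t : Nat), t ≤ xs.length →
    (solutionAltScan a xs).getD t x0 = a + (xs.take t).sum := by
  intro xs
  induction xs with
  | nil =>
    intro a t ht
    have h0 : t = 0 := by simpa using ht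
    subst h0; simp [solutionAltScan]
  | cons x xs ih =>
    intro a t ht
    cases t with
    | zero => simp [solutionAltScan]
    | succ t =>
      simp only [solutionAltScan, List.getD_cons_succ, List.take_succ_cons, List.sum_cons]
      rw [ih (a + x) t (by simpa using ht)]
      ring

lemma runs_nonnegB : ∀ (gs : List Bool) (t : Nat), 0 ≤ (solutionAltRunsB gs).getD t 0 := by
  intro gs
  induction gs with
  | nil => intro t; cases t <;> simp [solutionAltRunsB]
  | cons g gs ih =>
    intro t
    cases t with
    | zero =>
      simp only [solutionAltRunsB, List.getD_cons_zero]
      split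
      · have := ih 0
        have hh : (solutionAltRunsB gs).headD 0 = (solutionAltRunsB gs).getD 0 0 := by
          cases h : solutionAltRunsB gs with
          | nil => simp
          | cons y ys => simp
        omega
      · omega
    | succ t => simpa [solutionAltRunsB] using ih t

lemma runs_geB : ∀ (gs : List Bool) (t m : Nat), t + m ≤ gs.length →
    ((m : Int) ≤ (solutionAltRunsB gs).getD t 0 ↔ ∀ u, u < m → gs.getD (t + u) false = true) := by
  intro gs
  induction gs with
  | nil =>
    intro t m h
    simp only [List.length_nil, Nat.le_zero, Nat.add_eq_zero_iff] at h
    have ht : t = 0 := h.1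
    have hm : m = 0 := h.2
    subst ht; subst hm; simp [solutionAltRunsB]
  | cons g gs ih =>
    intro t m h
    cases t with
    | succ t =>
      have := ih t m (by simp at h; omega)
      simpa [solutionAltRunsB, Nat.succ_add] using this
    | zero =>
      cases m with
      | zero =>
        simp only [Nat.cast_zero]
        exact ⟨fun _ u hu => absurd hu (by omega), fun _ => runs_nonnegB (g :: gs) 0⟩
      | succ m =>
        have hh : (solutionAltRunsB gs).headD 0 = (solutionAltRunsB gs).getD 0 0 := by
          cases h : solutionAltRunsB gs with
          | nil => simp
          | cons y ys => simp
        have ihm := ih 0 m (by simpa using h)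
        simp only [solutionAltRunsB, List.getD_cons_zero]
        constructor
        · intro hle u hu
          split at hle
          · rename_i hx
            cases u with
            | zero => simpa using hx
            | succ u =>
              have : gs.getD (0 + u) false = true := by
                rw [hh] at hle
                exact (ihm.mp (by push_cast at hle ⊢; omega)) u (by omega)
              simpa using this
          · exfalso; push_cast at hle; omega
        · intro hall
          have hx : g = true := by simpa using hall 0 (by omega)
          rw [if_pos hx]
          have : ∀ u, u < m → gs.getD (0 + u) false = true := by
            intro u hu
            simpa using hall (u + 1) (by omega)
          have := ihm.mpr this
          rw [hh]; push_cast at this ⊢; omega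

lemma take_drop_eq_map_range (xs : List Int) (i m : Nat) (h : i + m ≤ xs.length) :
    (xs.drop i).take m = (List.range m).map fun t => xs.getD (i + t) 0 := by
  apply List.ext_getElem
  · simp; omega
  · intro t h1 h2
    have ht : t < m := by simpa using h2
    have hitm : i + t < xs.length := by omega
    simp [List.getElem_take, List.getElem_drop, List.getD_eq_getElem?_getD,
      List.getElem?_eq_getElem hitm]

lemma altW_eq (research : List String) (n k : Int) (hn : 1 ≤ n) (ch : Char) :
    ((PySem.List.pyRange 0 (PySem.List.len research - n + 1) 1).foldl
      (fun w i =>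
        if PySem.List.pyGetD (solutionAltRunsB ((research.map (fun s => s.toList.foldl (fun d c => d.insert c (d.getD c 0 + 1)) (PySem.Dict.empty : PySem.Dict Char Int))).map (fun d => d.contains ch && decide (d.getD ch 0 ≥ k)))) i 0 ≥ n ∧
           PySem.List.pyGetD (solutionAltScan 0 ((research.map (fun s => s.toList.foldl (fun d c => d.insert c (d.getD c 0 + 1)) (PySem.Dict.empty : PySem.Dict Char Int))).map (fun d => d.getD ch 0))) (i + n) 0 -
             PySem.List.pyGetD (solutionAltScan 0 ((research.map (fun s => s.toList.foldl (fun d c => d.insert c (d.getD c 0 + 1)) (PySem.Dict.empty : PySem.Dict Char Int))).map (fun d => d.getD ch 0))) i 0 ≥ 2 * n * k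
        then w + 1 else w) (0 : Int)) = (pvW research n k ch : Int) := by
  have hdays : (research.map (fun s => s.toList.foldl (fun d c => d.insert c (d.getD c 0 + 1)) (PySem.Dict.empty : PySem.Dict Char Int)))
      = research.map (fun s => PySem.Dict.counter s.toList) := by
    apply List.map_congr_left
    intro s _
    rfl
  rw [hdays]
  have hcnts : (research.map (fun s => PySem.Dict.counter s.toList)).map (fun d => PySem.Dict.getD d ch 0)
      = research.map (fun s => (s.toList.count ch : Int)) := by
    rw [List.map_map]
    apply List.map_congr_left
    intro s _
    simp [Function.comp, PySem.Dict.getD_counter]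
  have hgoods : (research.map (fun s => PySem.Dict.counter s.toList)).map (fun d => d.contains ch && decide (PySem.Dict.getD d ch 0 ≥ k))
      = research.map (fun s => decide (max k 1 ≤ (s.toList.count ch : Int))) := by
    rw [List.map_map]
    apply List.map_congr_left
    intro s _
    simp only [Function.comp, PySem.Dict.contains_counter, PySem.Dict.getD_counter]
    by_cases hmem : ch ∈ s.toList
    · have hpos : 0 < s.toList.count ch := List.count_pos_iff.mpr hmem
      have h1 : s.toList.contains ch = true := by simpa using hmem
      rw [h1, Bool.true_and]
      by_cases hk2 : k ≤ (s.toList.count ch : Int)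
      · rw [decide_eq_true (by omega : (s.toList.count ch : Int) ≥ k),
           decide_eq_true (by exact max_le hk2 (by omega) : max k 1 ≤ (s.toList.count ch : Int))]
      · rw [decide_eq_false (by omega : ¬ (s.toList.count ch : Int) ≥ k),
           decide_eq_false (by intro hle; exact hk2 (le_trans (le_max_left k 1) hle))]
    · have h0 : s.toList.count ch = 0 := List.count_eq_zero.mpr hmem
      have h1 : s.toList.contains ch = false := by simpa using hmem
      rw [h1, Bool.false_and]
      rw [decide_eq_false]
      intro hle
      have := le_trans (le_max_right k 1) hle
      omega
  set cnts := (research.map (fun s => PySem.Dict.counter s.toList)).map (fun d => PySem.Dict.getD d ch 0) with hc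
  set goods := (research.map (fun s => PySem.Dict.counter s.toList)).map (fun d => d.contains ch && decide (PySem.Dict.getD d ch 0 ≥ k)) with hgd
  have hclen : cnts.length = research.length := by rw [hcnts]; simp
  have hglen : goods.length = research.length := by rw [hgoods]; simp
  have hget : ∀ j : Nat, j < research.length → cnts.getD j 0 = pvCnt research ch j := by
    intro j hj
    rw [hcnts, List.getD_eq_getElem?_getD, List.getElem?_map, List.getElem?_eq_getElem hj]
    simp [pvCnt, List.getD_eq_getElem?_getD, List.getElem?_eq_getElem hj]
  have hgget : ∀ j : Nat, j < research.length →
      goods.getD j false = decide (max k 1 ≤ pvCnt research ch j) := by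
    intro j hj
    rw [hgoods, List.getD_eq_getElem?_getD, List.getElem?_map, List.getElem?_eq_getElem hj]
    simp [pvCnt, List.getD_eq_getElem?_getD, List.getElem?_eq_getElem hj]
  have hlen : PySem.List.len research = (research.length : Int) := by
    simp [PySem.List.len_eq]
  have hstep : (fun (w : Int) (i : Int) =>
      if PySem.List.pyGetD (solutionAltRunsB goods) i 0 ≥ n ∧
         PySem.List.pyGetD (solutionAltScan 0 cnts) (i + n) 0 -
           PySem.List.pyGetD (solutionAltScan 0 cnts) i 0 ≥ 2 * n * k
      then w + 1 else w)
      = (fun (w : Int) (i : Int) =>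
        if (fun i => decide (PySem.List.pyGetD (solutionAltRunsB goods) i 0 ≥ n ∧
           PySem.List.pyGetD (solutionAltScan 0 cnts) (i + n) 0 -
             PySem.List.pyGetD (solutionAltScan 0 cnts) i 0 ≥ 2 * n * k)) i = true
        then w + 1 else w) := by
    funext w i
    simp
  rw [hstep, PySem.List.foldl_count_if, PySem.List.pyRange_one, List.countP_map, hlen]
  have htoNat : (((research.length : Int) - n + 1) - 0).toNat = pvStarts research n := by
    unfold pvStarts; omega
  rw [htoNat]
  have hcount : (List.range (pvStarts research n)).countP
      ((fun i => decide (PySem.List.pyGetD (solutionAltRunsB goods) i 0 ≥ n ∧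
         PySem.List.pyGetD (solutionAltScan 0 cnts) (i + n) 0 -
           PySem.List.pyGetD (solutionAltScan 0 cnts) i 0 ≥ 2 * n * k)) ∘ (fun t : Nat => (0 : Int) + t))
      = (List.range (pvStarts research n)).countP (pvCondB research n k ch) := by
    apply List.countP_congr
    intro t ht
    have htS : t < pvStarts research n := List.mem_range.mp ht
    have htL : t < research.length := by
      have : pvStarts research n ≤ research.length := by unfold pvStarts; omega
      omega
    have htn : t + n.toNat ≤ research.length := by
      unfold pvStarts at htS; omega
    have hcast : (0 : Int) + (t : Int) = ((t : Nat) : Int) := by ring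
    simp only [Function.comp, hcast, decide_eq_true_eq]
    have hidx : ((t : Nat) : Int) + n = (((t + n.toNat : Nat)) : Int) := by
      push_cast; omega
    rw [hidx]
    simp only [PySem.List.pyGetD_natCast]
    -- the run-length condition
    have hnn : ((n.toNat : Nat) : Int) = n := by omega
    have hB := runs_geB goods t n.toNat (by omega)
    rw [hnn] at hB
    -- the prefix-sum condition
    have hpre1 := scan_getD 0 cnts 0 (t + n.toNat) (by omega)
    have hpre2 := scan_getD 0 cnts 0 t (by omega)
    rw [hpre1, hpre2]
    have htake : (cnts.take (t + n.toNat)).sum = (cnts.take t).sum + ((cnts.drop t).take n.toNat).sum := by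
      rw [List.take_add, List.sum_append]
    have hsum : ((cnts.drop t).take n.toNat).sum
        = (((List.range n.toNat).map fun u => pvCnt research ch (t + u))).sum := by
      rw [take_drop_eq_map_range cnts t n.toNat (by omega)]
      congr 1
      apply List.map_congr_left
      intro u hu
      exact hget (t + u) (by simp at hu; omega)
    constructor
    · rintro ⟨hBc, hCc⟩
      have hruns : ∀ u, u < n.toNat → goods.getD (t + u) false = true := hB.mp hBc
      unfold pvCondB
      rw [Bool.and_eq_true, Bool.and_eq_true]
      refine ⟨⟨?_, ?_⟩, ?_⟩
      · have := hruns 0 (by omega)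
        rw [Nat.add_zero, hgget t htL] at this
        exact this
      · rw [List.all_eq_true]
        intro u hu
        have := hruns u (by simpa using hu)
        rwa [hgget (t + u) (by simp at hu; omega)] at this
      · rw [decide_eq_true_eq]
        rw [htake, hsum] at hCc
        omega
    · intro hP
      unfold pvCondB at hP
      rw [Bool.and_eq_true, Bool.and_eq_true] at hP
      obtain ⟨⟨_, h2⟩, h3⟩ := hP
      refine ⟨?_, ?_⟩
      · rw [ge_iff_le, hB]
        intro u hu
        rw [hgget (t + u) (by omega)]
        rw [List.all_eq_true] at h2
        exact h2 u (by simpa using hu)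
      · rw [htake]
        have := of_decide_eq_true h3
        rw [hsum]
        omega
  rw [hcount]
  unfold pvW
  ring

lemma alt_eq_pvResult (research : List String) (n k : Int) (hn : 1 ≤ n) :
    solution_alt research n k = pvResult research n k := by
  unfold solution_alt pvResult
  simp only
  congr 2
  funext b ch
  rw [altW_eq research n k hn ch]

lemma a_eq_pvResult (research : List String) (n k : Int) :
    solution research n k = pvResult research n k := by
  obtain ⟨hg0, hk0, hn0⟩ := outer_spec research n k (solutionDays research) 0 PySem.Dict.empty
    (by rw [List.drop_zero]) (by simp)
  have hL : PySem.List.len (solutionDays research) = (research.length : Int) := by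
    simp [solutionDays]
  unfold solution
  simp only
  rw [hL]
  set A := solutionOuter (solutionDays research) n k (research.length : Int)
    (PySem.List.enumerate (solutionDays research)) PySem.Dict.empty with hA
  have hzero : PySem.List.enumerate (solutionDays research) ((0 : Nat) : Int)
      = PySem.List.enumerate (solutionDays research) := by norm_num
  rw [hzero] at hg0 hk0 hn0
  rw [← hA] at hg0 hk0 hn0
  have hrange : List.range' 0 (pvStarts research n - 0) = List.range (pvStarts research n) := by
    rw [Nat.sub_zero, List.range_eq_range']
  have hansg : ∀ c, A.getD c 0 = (pvW research n k c : Int) := by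
    intro c
    rw [hg0 c, hrange]
    simp [pvW]
  have hansm : ∀ c, c ∈ A.keys ↔ 0 < pvW research n k c := by
    intro c
    rw [hk0 c, hrange]
    simp [pvW]
  have hannd : A.keys.Nodup := hn0
  -- abbreviations for the B-side selection
  set chars := research.foldl (fun acc s => PySem.Set.update acc (PySem.Set.ofList s.toList)) ([] : List Char) with hchars
  set SC := PySem.List.sorted chars (fun x => x) false with hSC
  set v : Char → Int := fun c => (pvW research n k c : Int) with hv
  have hSCmem : ∀ c, c ∈ SC ↔ c ∈ chars := by
    intro c
    rw [hSC]
    exact (PySem.List.sorted_perm chars (fun x => x) false).mem_iff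
  have hkeysSC : ∀ c ∈ A.keys, c ∈ SC := by
    intro c hc
    rw [hSCmem, hchars, chars_mem]
    exact pvW_pos_mem research n k c ((hansm c).mp hc)
  by_cases hempty : A.keys.length = 0
  · rw [if_pos hempty]
    have hkeys : A.keys = [] := List.length_eq_zero_iff.mp hempty
    have hall0 : ∀ c ∈ SC, v c ≤ 0 := by
      intro c _
      have hvc : v c = (pvW research n k c : Int) := rfl
      rw [hvc]
      by_contra hlt
      have hpos : 0 < pvW research n k c := by omega
      have hmem := (hansm c).mpr hpos
      rw [hkeys] at hmem
      simp at hmem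
    unfold pvResult
    rw [← hchars, ← hSC]
    have hfold := foldBest_low v (fun c => String.ofList [c]) SC 0 "None" hall0
    rw [hv] at hfold
    beta_reduce at hfold
    rw [hfold]
  · rw [if_neg hempty]
    have hne : A.keys ≠ [] := by
      intro h
      rw [h] at hempty
      simp at hempty
    obtain ⟨c0, hc0⟩ := List.exists_mem_of_ne_nil A.keys hne
    -- rewrite items as a map over keys
    have hitems : A.items = A.keys.map (fun c => (c, A.getD c 0)) :=
      PySem.Dict.items_eq_map_keys A hannd 0
    rw [hitems, List.foldl_map, List.foldl_map]
    have hstepmax : (fun (m : Int) (c : Char) =>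
        if ((fun c => (c, A.getD c 0)) c).2 > m then ((fun c => (c, A.getD c 0)) c).2 else m)
        = (fun (m : Int) (c : Char) => if v c > m then v c else m) := by
      funext m c
      simp only [hansg c, hv]
    rw [hstepmax]
    set M := A.keys.foldl (fun m c => if v c > m then v c else m) 0 with hM
    obtain ⟨hmax1, hmax2, hmax3⟩ := foldMax_spec v A.keys 0
    rw [← hM] at hmax1 hmax2 hmax3
    have hM1 : 1 ≤ M := by
      have h1 : 0 < pvW research n k c0 := (hansm c0).mp hc0
      have h2 : (pvW research n k c0 : Int) ≤ M := by simpa [hv] using hmax1 c0 hc0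
      omega
    obtain ⟨cM, hcM, hMv⟩ : ∃ c ∈ A.keys, M = v c := by
      rcases hmax2 with h | h
      · omega
      · exact h
    -- res as a filter over keys
    have hstepres : (fun (r : List Char) (c : Char) =>
        if ((fun c => (c, A.getD c 0)) c).2 = M then r ++ [((fun c => (c, A.getD c 0)) c).1] else r)
        = (fun (r : List Char) (c : Char) =>
          if (fun c => decide (v c = M)) c = true then r ++ [(fun (c : Char) => c) c] else r) := by
      funext r c
      simp only [hansg c, hv, decide_eq_true_eq]
    rw [hstepres, PySem.List.foldl_append_if, List.nil_append, List.map_id']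
    set res := A.keys.filter (fun c => decide (v c = M)) with hres
    have hresne : res ≠ [] := by
      have hmemf : cM ∈ res :=
        List.mem_filter.mpr ⟨hcM, by simpa using hMv.symm⟩
      exact List.ne_nil_of_mem hmemf
    cases hsrt : PySem.List.sorted res (fun x => x) false with
    | nil => exact absurd ((PySem.List.sorted_eq_nil_iff res (fun x => x) false).mp hsrt) hresne
    | cons rA tl =>
      rw [PySem.List.pyGet?_zero_cons]
      have hrAres : rA ∈ res := by
        have : rA ∈ PySem.List.sorted res (fun x => x) false := by rw [hsrt]; simp
        rwa [(PySem.List.sorted_perm res (fun x => x) false).mem_iff] at this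
      have hrAle : ∀ y ∈ res, rA ≤ y := PySem.List.key_head_sorted_le res (fun x => x) hsrt
      have hrAkeys : rA ∈ A.keys := (List.mem_filter.mp hrAres).1
      have hrAM : v rA = M := by
        have := (List.mem_filter.mp hrAres).2
        simpa using this
      -- B side
      have hSCpw : SC.Pairwise (· < ·) := by
        have h1 := PySem.List.sorted_pairwise chars (fun x => x)
        have h2 : SC.Nodup :=
          ((PySem.List.sorted_perm chars (fun x => x) false).nodup_iff).mpr (chars_nodup research)
        rw [← hSC] at h1
        exact (h1.and h2).imp (fun h => lt_of_le_of_ne h.1 h.2)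
      have hex : ∃ c ∈ SC, (0 : Int) < v c := by
        refine ⟨cM, hkeysSC cM hcM, ?_⟩
        rw [← hMv]
        omega
      obtain ⟨cB, hcB, hcBpos, hfold, hcBmax, hcBtie⟩ :=
        foldBest_high v (fun c => String.ofList [c]) SC 0 "None" hSCpw hex
      have hcBkeys : cB ∈ A.keys := by
        rw [hansm]
        have hp : (0 : Int) < (pvW research n k cB : Int) := by simpa [hv] using hcBpos
        omega
      have hcBM : v cB = M := by
        have h1 : v cB ≤ M := hmax1 cB hcBkeys
        have h2 : M ≤ v cB := by
          rw [hMv]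
          exact hcBmax cM (hkeysSC cM hcM)
        omega
      have hcBres : cB ∈ res :=
        List.mem_filter.mpr ⟨hcBkeys, by simp [hcBM]⟩
      have heq : rA = cB := by
        have h1 : rA ≤ cB := hrAle cB hcBres
        have h2 : cB ≤ rA := hcBtie rA (hkeysSC rA hrAkeys) (by rw [hrAM, hcBM])
        exact le_antisymm h1 h2
      unfold pvResult
      rw [← hchars, ← hSC]
      rw [hv] at hfold
      beta_reduce at hfold
      rw [hfold, heq]

-- ===== VERDICT (by name: the statement is the Claim_ definition above) =====
theorem solution_spec : Claim_equal_solution := by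
  intro research n k _hdom hpre
  unfold Spec_solution
  rw [a_eq_pvResult, alt_eq_pvResult research n k hpre]
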